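-- pv_equiv track=rewrite | github.com/nyucel/blm2010 | 170401032/turev.py | matris
-- ===== SOURCE A (Python) =====
-- def xi(uzunluk):
--     xkare=[]
--     xkare.append(uzunluk)
--     for i in range(1,7): #2m=3*2=6
--         deger=0
--         for j in range(uzunluk):
--             deger += (j + 1) ** i
--         xkare.append(deger)
--     return xkare
--
-- def xiyi(uzunluk,primes):
--     xiyi=[]
--     xiyi.append(sum(primes))
--     for i in range(1,4,1): #formulde xiyinin derecesi m ile bitiyor.
--         q=0
--         for j in range(uzunluk):
--             q+=(j+1)**i*primes[j]
--         xiyi.append(q)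
--     return xiyi
--
-- def matris(uzunluk,primes,sayac):
--     x=xi(uzunluk)
--     y=xiyi(uzunluk,primes)
--     matris=[]
--     satir=0
--     for i in range(0,sayac):
--         newsatir=[]
--         for i in range(satir,sayac+satir):
--             newsatir.append(x[i])
--         newsatir.append(y[satir])
--         satir+=1
--         matris.append(newsatir)
--     return matris
-- ===== SOURCE B (Python) =====
-- def matris(uzunluk, primes, sayac):
--     n = max(uzunluk, 0)
--     x = [uzunluk,
--          n * (n + 1) // 2,
--          n * (n + 1) * (2 * n + 1) // 6,
--          (n * (n + 1) // 2) ** 2,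
--          n * (n + 1) * (2 * n + 1) * (3 * n * n + 3 * n - 1) // 30,
--          n * n * (n + 1) ** 2 * (2 * n * n + 2 * n - 1) // 12,
--          n * (n + 1) * (2 * n + 1) * (3 * n ** 4 + 6 * n ** 3 - 3 * n + 1) // 42]
--     s1 = s2 = s3 = 0
--     for j, p in enumerate(primes[:n], 1):
--         s1 += j * p
--         s2 += j * j * p
--         s3 += j * j * j * p
--     y = [sum(primes), s1, s2, s3]
--     return [x[satir:satir + sayac] + [y[satir]] for satir in range(sayac)]
-- ===== Notes on version B (the rewrite author's own statement) =====
-- stated objective: faster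
-- what changed: x power sums Σ k^i are computed by closed-form Faulhaber polynomials (exact integer floor divisions) instead of six accumulation loops, the three y loops are fused into one enumerate pass over primes[:n], and rows are built by list slicing instead of an inner index loop.
import Mathlib
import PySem

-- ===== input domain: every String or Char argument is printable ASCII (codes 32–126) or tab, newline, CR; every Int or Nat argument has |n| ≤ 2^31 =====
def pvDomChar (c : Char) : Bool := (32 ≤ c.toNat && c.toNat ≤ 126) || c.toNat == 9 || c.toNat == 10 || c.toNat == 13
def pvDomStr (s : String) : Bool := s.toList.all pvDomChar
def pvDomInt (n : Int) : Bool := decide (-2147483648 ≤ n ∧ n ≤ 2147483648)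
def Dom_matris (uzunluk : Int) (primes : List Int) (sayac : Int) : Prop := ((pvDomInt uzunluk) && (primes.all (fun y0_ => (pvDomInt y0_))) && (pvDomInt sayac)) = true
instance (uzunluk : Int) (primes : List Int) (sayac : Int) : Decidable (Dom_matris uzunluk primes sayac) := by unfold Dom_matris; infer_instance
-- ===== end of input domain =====

-- B replaces A's inner power-sum loops for x by closed-form Faulhaber polynomials and A's three
-- separate y-loops by a single pass over the primes; same return value wherever A returns.

-- ===== PORT A =====
-- (j + 1) ** i with i ∈ 1..6 from range(1,7): exact as (j + 1) ^ i.toNat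
def xiA (uzunluk : Int) : List Int :=
  (PySem.List.pyRange 1 7 1).foldl (fun xkare i =>
      xkare ++ [(PySem.List.pyRange 0 uzunluk 1).foldl (fun deger j => deger + (j + 1) ^ i.toNat) 0])
    [uzunluk]

def xiyiA (uzunluk : Int) (primes : List Int) : List Int :=
  (PySem.List.pyRange 1 4 1).foldl (fun acc i =>
      acc ++ [(PySem.List.pyRange 0 uzunluk 1).foldl
        (fun q j => q + (j + 1) ^ i.toNat * PySem.List.pyGetD primes j 0) 0])
    [primes.sum]

def matris (uzunluk : Int) (primes : List Int) (sayac : Int) : List (List Int) :=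
  let x := xiA uzunluk
  let y := xiyiA uzunluk primes
  ((PySem.List.pyRange 0 sayac 1).foldl (fun (st : List (List Int) × Int) _ =>
      let satir := st.2
      let newsatir := (PySem.List.pyRange satir (sayac + satir) 1).foldl
        (fun ns i => ns ++ [PySem.List.pyGetD x i 0]) []
      (st.1 ++ [newsatir ++ [PySem.List.pyGetD y satir 0]], satir + 1))
    ([], 0)).1

-- ===== PORT B =====
def matris_alt (uzunluk : Int) (primes : List Int) (sayac : Int) : List (List Int) :=
  let n := max uzunluk 0
  let x : List Int := [uzunluk,
    PySem.Int.floordiv (n * (n + 1)) 2,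
    PySem.Int.floordiv (n * (n + 1) * (2 * n + 1)) 6,
    (PySem.Int.floordiv (n * (n + 1)) 2) ^ 2,
    PySem.Int.floordiv (n * (n + 1) * (2 * n + 1) * (3 * n * n + 3 * n - 1)) 30,
    PySem.Int.floordiv (n * n * (n + 1) ^ 2 * (2 * n * n + 2 * n - 1)) 12,
    PySem.Int.floordiv (n * (n + 1) * (2 * n + 1) * (3 * n ^ 4 + 6 * n ^ 3 - 3 * n + 1)) 42]
  let s := (PySem.List.enumerate (PySem.List.slice primes none (some n)) 1).foldl
    (fun (s : Int × Int × Int) jp =>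
      (s.1 + jp.1 * jp.2, s.2.1 + jp.1 * jp.1 * jp.2, s.2.2 + jp.1 * jp.1 * jp.1 * jp.2))
    (0, 0, 0)
  let y : List Int := [primes.sum, s.1, s.2.1, s.2.2]
  (PySem.List.pyRange 0 sayac 1).map (fun satir =>
    PySem.List.slice x (some satir) (some (satir + sayac)) ++ [PySem.List.pyGetD y satir 0])

-- ===== PRECONDITION & SPEC =====
-- Pre excludes exactly the inputs where A raises IndexError: primes[j] read for j < uzunluk
-- beyond primes' length, or matrix indices x[i]/y[satir] out of range (which happens iff sayac > 4).
def Pre_matris (uzunluk : Int) (primes : List Int) (sayac : Int) : Prop :=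
  (uzunluk ≤ 0 ∨ uzunluk ≤ primes.length) ∧ sayac ≤ 4

instance (uzunluk : Int) (primes : List Int) (sayac : Int) : Decidable (Pre_matris uzunluk primes sayac) := by unfold Pre_matris; infer_instance

def pvWitness_matris : Int × List Int × Int := (3, [2, 3, 5], 2)

def Spec_matris (uzunluk : Int) (primes : List Int) (sayac : Int) (out : List (List Int)) : Prop := out = matris_alt uzunluk primes sayac
instance (uzunluk : Int) (primes : List Int) (sayac : Int) (out : List (List Int)) : Decidable (Spec_matris uzunluk primes sayac out) := by unfold Spec_matris; infer_instance

-- ===== CLAIM (what is proved, stated in full; the proofs are below) =====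
def Claim_equal_matris : Prop := ∀ (uzunluk : Int) (primes : List Int) (sayac : Int), Dom_matris uzunluk primes sayac → Pre_matris uzunluk primes sayac → Spec_matris uzunluk primes sayac (matris uzunluk primes sayac)


-- ===== LEMMAS AND PROOFS =====

-- A's inner x-loop: sum of (j+1)^e for j in range(u)
def SxF (e : Nat) (u : Int) : Int :=
  (PySem.List.pyRange 0 u 1).foldl (fun deger j => deger + (j + 1) ^ e) 0

-- A's inner y-loop with a generic addend g (j+1) primes[j]
def QF (g : Int → Int → Int) (primes : List Int) (u : Int) : Int :=
  (PySem.List.pyRange 0 u 1).foldl (fun q j => q + g (j + 1) (PySem.List.pyGetD primes j 0)) 0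

lemma pyRange_nonpos {u : Int} (h : u ≤ 0) : PySem.List.pyRange 0 u 1 = [] := by
  simp [PySem.List.pyRange]; omega

lemma SxF_succ (e : Nat) (m : Nat) : SxF e ((m : Int) + 1) = SxF e m + ((m : Int) + 1) ^ e := by
  unfold SxF
  rw [PySem.List.pyRange_one_succ_right (by positivity)]
  simp [List.foldl_append]

lemma SxF_zero (e : Nat) : SxF e 0 = 0 := by
  unfold SxF
  rw [pyRange_nonpos le_rfl]
  rfl

lemma SxF1 (m : Nat) : 2 * SxF 1 m = (m : Int) * (m + 1) := by
  induction m with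
  | zero => simp [SxF_zero]
  | succ m ih => push_cast [SxF_succ]; push_cast at ih; linear_combination ih

lemma SxF2 (m : Nat) : 6 * SxF 2 m = (m : Int) * (m + 1) * (2 * m + 1) := by
  induction m with
  | zero => simp [SxF_zero]
  | succ m ih => push_cast [SxF_succ]; push_cast at ih; linear_combination ih

lemma SxF3 (m : Nat) : SxF 3 m = (SxF 1 m) ^ 2 := by
  induction m with
  | zero => simp [SxF_zero]
  | succ m ih =>
    push_cast [SxF_succ]
    linear_combination ih - ((m : Int) + 1) * SxF1 m

lemma SxF4 (m : Nat) : 30 * SxF 4 m = (m : Int) * (m + 1) * (2 * m + 1) * (3 * m * m + 3 * m - 1) := by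
  induction m with
  | zero => simp [SxF_zero]
  | succ m ih => push_cast [SxF_succ]; push_cast at ih; linear_combination ih

lemma SxF5 (m : Nat) : 12 * SxF 5 m = (m : Int) * (m : Int) * ((m : Int) + 1) ^ 2 * (2 * m * m + 2 * m - 1) := by
  induction m with
  | zero => simp [SxF_zero]
  | succ m ih => push_cast [SxF_succ]; push_cast at ih; linear_combination ih

lemma SxF6 (m : Nat) : 42 * SxF 6 m = (m : Int) * (m + 1) * (2 * m + 1) * (3 * (m : Int) ^ 4 + 6 * (m : Int) ^ 3 - 3 * m + 1) := by
  induction m with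
  | zero => simp [SxF_zero]
  | succ m ih => push_cast [SxF_succ]; push_cast at ih; linear_combination ih

lemma fdiv_of_mul {d s a : Int} (hd : 0 < d) (h : d * s = a) : PySem.Int.floordiv a d = s := by
  subst h
  rw [PySem.Int.floordiv_eq_ediv_of_pos hd]
  exact Int.mul_ediv_cancel_left s hd.ne'

-- generic shape: SxF e u equals an exact floor division of the Faulhaber polynomial at max u 0
lemma Sx_closed (e : Nat) (d : Int) (P : Int → Int) (hd : 0 < d) (hP0 : P 0 = 0)
    (hPm : ∀ m : Nat, d * SxF e m = P m) (u : Int) :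
    SxF e u = PySem.Int.floordiv (P (max u 0)) d := by
  by_cases h : u ≤ 0
  · rw [max_eq_right h, hP0]
    unfold SxF
    rw [pyRange_nonpos h]
    rw [PySem.Int.floordiv_eq_ediv_of_pos hd]
    simp
  · push_neg at h
    obtain ⟨m, rfl⟩ := Int.eq_ofNat_of_zero_le h.le
    rw [max_eq_left (by positivity)]
    exact (fdiv_of_mul hd (hPm m)).symm

lemma SxF3_int (u : Int) : SxF 3 u = (SxF 1 u) ^ 2 := by
  by_cases h : u ≤ 0
  · unfold SxF
    rw [pyRange_nonpos h]
    rfl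
  · push_neg at h
    obtain ⟨m, rfl⟩ := Int.eq_ofNat_of_zero_le h.le
    exact SxF3 m

lemma xiA_fold (u : Int) :
    xiA u = [u, SxF 1 u, SxF 2 u, SxF 3 u, SxF 4 u, SxF 5 u, SxF 6 u] := by
  unfold xiA SxF
  rw [(by decide : PySem.List.pyRange 1 7 1 = [1, 2, 3, 4, 5, 6])]
  norm_num [List.foldl, (by decide : Int.toNat 2 = 2), (by decide : Int.toNat 3 = 3),
    (by decide : Int.toNat 4 = 4), (by decide : Int.toNat 5 = 5), (by decide : Int.toNat 6 = 6)]

lemma xiA_eq (u : Int) : xiA u =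
    [u,
     PySem.Int.floordiv ((max u 0) * ((max u 0) + 1)) 2,
     PySem.Int.floordiv ((max u 0) * ((max u 0) + 1) * (2 * (max u 0) + 1)) 6,
     (PySem.Int.floordiv ((max u 0) * ((max u 0) + 1)) 2) ^ 2,
     PySem.Int.floordiv ((max u 0) * ((max u 0) + 1) * (2 * (max u 0) + 1) * (3 * (max u 0) * (max u 0) + 3 * (max u 0) - 1)) 30,
     PySem.Int.floordiv ((max u 0) * (max u 0) * ((max u 0) + 1) ^ 2 * (2 * (max u 0) * (max u 0) + 2 * (max u 0) - 1)) 12,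
     PySem.Int.floordiv ((max u 0) * ((max u 0) + 1) * (2 * (max u 0) + 1) * (3 * (max u 0) ^ 4 + 6 * (max u 0) ^ 3 - 3 * (max u 0) + 1)) 42] := by
  rw [xiA_fold]
  rw [Sx_closed 1 2 (fun n => n * (n + 1)) (by norm_num) (by norm_num)
      (fun m => by rw [SxF1]) u]
  rw [Sx_closed 2 6 (fun n => n * (n + 1) * (2 * n + 1)) (by norm_num) (by norm_num)
      (fun m => by rw [SxF2]) u]
  rw [Sx_closed 4 30 (fun n => n * (n + 1) * (2 * n + 1) * (3 * n * n + 3 * n - 1)) (by norm_num) (by norm_num)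
      (fun m => by rw [SxF4]) u]
  rw [Sx_closed 5 12 (fun n => n * n * (n + 1) ^ 2 * (2 * n * n + 2 * n - 1)) (by norm_num) (by norm_num)
      (fun m => by rw [SxF5]) u]
  rw [Sx_closed 6 42 (fun n => n * (n + 1) * (2 * n + 1) * (3 * n ^ 4 + 6 * n ^ 3 - 3 * n + 1)) (by norm_num) (by norm_num)
      (fun m => by rw [SxF6]) u]
  rw [SxF3_int u]
  rw [Sx_closed 1 2 (fun n => n * (n + 1)) (by norm_num) (by norm_num)
      (fun m => by rw [SxF1]) u]

lemma QF_succ (g : Int → Int → Int) (primes : List Int) (m : Nat) :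
    QF g primes ((m : Int) + 1) = QF g primes m + g ((m : Int) + 1) (PySem.List.pyGetD primes (m : Int) 0) := by
  unfold QF
  rw [PySem.List.pyRange_one_succ_right (by positivity)]
  simp [List.foldl_append]

lemma QF_eq_enum (g : Int → Int → Int) (primes : List Int) (m : Nat) (hm : m ≤ primes.length) :
    (PySem.List.enumerate (primes.take m) 1).foldl (fun a jp => a + g jp.1 jp.2) 0 = QF g primes m := by
  induction m with
  | zero => simp [QF, pyRange_nonpos le_rfl]
  | succ m ih =>
    have hlt : m < primes.length := hm
    have hm' : m ≤ primes.length := le_of_lt hlt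
    rw [List.take_succ, List.getElem?_eq_getElem hlt]
    rw [show (some primes[m]).toList = [primes[m]] from rfl]
    rw [PySem.List.enumerate_append, List.foldl_append]
    have hlen : (primes.take m).length = m := by simp [List.length_take, min_eq_left hm']
    rw [hlen, ih hm']
    push_cast
    rw [QF_succ]
    rw [show (1 : Int) + (m : Int) = (m : Int) + 1 by ring]
    simp [PySem.List.enumerate, PySem.List.pyGetD_natCast, List.getD_eq_getElem?_getD,
      List.getElem?_eq_getElem hlt]

lemma foldl_ext {a b : Type} (f g : b → a → b) (h : ∀ x y, f x y = g x y) (l : List a) (init : b) :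
    List.foldl f init l = List.foldl g init l := by
  induction l generalizing init with
  | nil => rfl
  | cons x xs ih => simp only [List.foldl, h]; exact ih _

-- B's one-pass triple fold equals A's three separate y loops
lemma yA_eq (u : Int) (primes : List Int) (hpre : u ≤ 0 ∨ u ≤ (primes.length : Int)) :
    xiyiA u primes =
      [primes.sum,
       ((PySem.List.enumerate (PySem.List.slice primes none (some (max u 0))) 1).foldl
         (fun (s : Int × Int × Int) jp =>
           (s.1 + jp.1 * jp.2, s.2.1 + jp.1 * jp.1 * jp.2, s.2.2 + jp.1 * jp.1 * jp.1 * jp.2))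
         (0, 0, 0)).1,
       ((PySem.List.enumerate (PySem.List.slice primes none (some (max u 0))) 1).foldl
         (fun (s : Int × Int × Int) jp =>
           (s.1 + jp.1 * jp.2, s.2.1 + jp.1 * jp.1 * jp.2, s.2.2 + jp.1 * jp.1 * jp.1 * jp.2))
         (0, 0, 0)).2.1,
       ((PySem.List.enumerate (PySem.List.slice primes none (some (max u 0))) 1).foldl
         (fun (s : Int × Int × Int) jp =>
           (s.1 + jp.1 * jp.2, s.2.1 + jp.1 * jp.1 * jp.2, s.2.2 + jp.1 * jp.1 * jp.1 * jp.2))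
         (0, 0, 0)).2.2] := by
  rw [PySem.List.foldl_prod_mk (f := fun (a : Int) (jp : Int × Int) => a + jp.1 * jp.2)
      (g := fun (bc : Int × Int) (jp : Int × Int) => (bc.1 + jp.1 * jp.1 * jp.2, bc.2 + jp.1 * jp.1 * jp.1 * jp.2))]
  rw [PySem.List.foldl_prod_mk (f := fun (b : Int) (jp : Int × Int) => b + jp.1 * jp.1 * jp.2)
      (g := fun (c : Int) (jp : Int × Int) => c + jp.1 * jp.1 * jp.1 * jp.2)]
  unfold xiyiA
  rw [(by decide : PySem.List.pyRange 1 4 1 = [1, 2, 3])]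
  norm_num [List.foldl, (by decide : Int.toNat 2 = 2), (by decide : Int.toNat 3 = 3)]
  by_cases h : u ≤ 0
  · rw [max_eq_right h, pyRange_nonpos h]
    rw [show PySem.List.slice primes none (some 0) = [] from by
      simp [PySem.List.slice, PySem.List.clampIdx]]
    simp [PySem.List.enumerate]
  · push_neg at h
    obtain ⟨m, rfl⟩ := Int.eq_ofNat_of_zero_le h.le
    have hm : m ≤ primes.length := by
      rcases hpre with h' | h'
      · exfalso; omega
      · exact_mod_cast h'
    rw [max_eq_left (by positivity), PySem.List.slice_to_natCast]
    have hb1 : (PySem.List.enumerate (primes.take m) 1).foldl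
        (fun (a : Int) (jp : Int × Int) => a + jp.1 * jp.2) 0
        = QF (fun a b => a * b) primes m := QF_eq_enum (fun a b => a * b) primes m hm
    have hb2 : (PySem.List.enumerate (primes.take m) 1).foldl
        (fun (a : Int) (jp : Int × Int) => a + jp.1 * jp.1 * jp.2) 0
        = QF (fun a b => a * a * b) primes m := QF_eq_enum (fun a b => a * a * b) primes m hm
    have hb3 : (PySem.List.enumerate (primes.take m) 1).foldl
        (fun (a : Int) (jp : Int × Int) => a + jp.1 * jp.1 * jp.1 * jp.2) 0
        = QF (fun a b => a * a * a * b) primes m := QF_eq_enum (fun a b => a * a * a * b) primes m hm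
    rw [hb1, hb2, hb3]
    have qa1 : (PySem.List.pyRange 0 (m : Int) 1).foldl
        (fun (q j : Int) => q + (j + 1) * PySem.List.pyGetD primes j 0) 0
        = QF (fun a b => a * b) primes m := by
      unfold QF
      apply foldl_ext
      intro b a
      ring
    have qa2 : (PySem.List.pyRange 0 (m : Int) 1).foldl
        (fun (q j : Int) => q + (j + 1) ^ 2 * PySem.List.pyGetD primes j 0) 0
        = QF (fun a b => a * a * b) primes m := by
      unfold QF
      apply foldl_ext
      intro b a
      ring
    have qa3 : (PySem.List.pyRange 0 (m : Int) 1).foldl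
        (fun (q j : Int) => q + (j + 1) ^ 3 * PySem.List.pyGetD primes j 0) 0
        = QF (fun a b => a * a * a * b) primes m := by
      unfold QF
      apply foldl_ext
      intro b a
      ring
    rw [qa1, qa2, qa3]
    exact ⟨rfl, rfl, rfl⟩

lemma assemble_eq (a0 a1 a2 a3 a4 a5 a6 b0 b1 b2 b3 : Int) (sayac : Int) (hs : sayac ≤ 4) :
    (((PySem.List.pyRange 0 sayac 1).foldl (fun (st : List (List Int) × Int) _ =>
      let satir := st.2
      let newsatir := (PySem.List.pyRange satir (sayac + satir) 1).foldl
        (fun ns i => ns ++ [PySem.List.pyGetD [a0,a1,a2,a3,a4,a5,a6] i 0]) []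
      (st.1 ++ [newsatir ++ [PySem.List.pyGetD [b0,b1,b2,b3] satir 0]], satir + 1))
    ([], 0)).1 : List (List Int)) =
    (PySem.List.pyRange 0 sayac 1).map (fun satir =>
      PySem.List.slice [a0,a1,a2,a3,a4,a5,a6] (some satir) (some (satir + sayac)) ++ [PySem.List.pyGetD [b0,b1,b2,b3] satir 0]) := by
  by_cases h : sayac ≤ 0
  · rw [pyRange_nonpos h]; rfl
  · push_neg at h
    interval_cases sayac
    all_goals
      norm_num [PySem.List.pyRange, PySem.List.slice, PySem.List.clampIdx,
        PySem.List.pyGetD, PySem.List.pyGet?, PySem.List.pyIdx?, List.range_succ,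
        (by decide : Int.toNat 2 = 2), (by decide : Int.toNat 3 = 3), (by decide : Int.toNat 4 = 4),
        (by decide : Int.toNat 5 = 5), (by decide : Int.toNat 6 = 6), (by decide : Int.toNat 7 = 7)]

-- ===== VERDICT (by name: the statement is the Claim_ definition above) =====
theorem matris_spec : Claim_equal_matris := by
  intro u primes s _ hpre
  unfold Spec_matris matris matris_alt
  simp only []
  rw [xiA_eq u, yA_eq u primes (by rcases hpre.1 with h | h; exact Or.inl h; exact Or.inr (by exact_mod_cast h))]
  exact assemble_eq _ _ _ _ _ _ _ _ _ _ _ s hpre.2
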